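-- pv_equiv track=rewrite | github.com/asjadaugust/ds-algo-py | BreadthFirstSearch/minIsland.py | exploreSum
-- ===== SOURCE A (Python) =====
-- def exploreSum(grid, location, visited):
--     r, c = location
--     rbound = 0 <= r < len(grid)
--     cbound = 0 <= c < len(grid[0])
--
--     if not(rbound and cbound): return 0
--     if grid[r][c] == 0: return 0
--     if location in visited: return 0
--
--     visited.add(location)
--     ctr = 1
--     ctr += exploreSum(grid, (r-1, c), visited)
--     ctr += exploreSum(grid, (r+1, c), visited)
--     ctr += exploreSum(grid, (r, c-1), visited)
--     ctr += exploreSum(grid, (r, c+1), visited)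
--
--     return ctr
-- ===== SOURCE B (Python) =====
-- def exploreSum(grid, location, visited):
--     # Iterative flood fill with an explicit stack instead of recursion.
--     # Mutates `visited` exactly as A does (same cells added).
--     stack = [location]
--     count = 0
--     while stack:
--         r, c = stack.pop()
--         if not (0 <= r < len(grid) and 0 <= c < len(grid[0])):
--             continue
--         if grid[r][c] == 0 or (r, c) in visited:
--             continue
--         visited.add((r, c))
--         count += 1
--         stack.extend([(r, c + 1), (r, c - 1), (r + 1, c), (r - 1, c)])
--     return count
-- ===== Notes on version B (the rewrite author's own statement) =====
-- stated objective: idiomatic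
-- what changed: The recursive DFS flood fill (four self-calls threading the visited set) is replaced by an iterative flood fill with an explicit stack: push the start, pop a cell, re-apply A's guards, mark and count it, push its four neighbours.
-- outside the precondition, e.g. on exploreSum([[1, 0], [0]], (0, 0), set()): A returns 1, B returns 1
-- crash fix: On grid == [] A raises IndexError (it evaluates len(grid[0]) unconditionally), while B's short-circuit bounds check returns 0. — e.g. on exploreSum([], (0, 0), []): A raises IndexError, B returns 0
import Mathlib
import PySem

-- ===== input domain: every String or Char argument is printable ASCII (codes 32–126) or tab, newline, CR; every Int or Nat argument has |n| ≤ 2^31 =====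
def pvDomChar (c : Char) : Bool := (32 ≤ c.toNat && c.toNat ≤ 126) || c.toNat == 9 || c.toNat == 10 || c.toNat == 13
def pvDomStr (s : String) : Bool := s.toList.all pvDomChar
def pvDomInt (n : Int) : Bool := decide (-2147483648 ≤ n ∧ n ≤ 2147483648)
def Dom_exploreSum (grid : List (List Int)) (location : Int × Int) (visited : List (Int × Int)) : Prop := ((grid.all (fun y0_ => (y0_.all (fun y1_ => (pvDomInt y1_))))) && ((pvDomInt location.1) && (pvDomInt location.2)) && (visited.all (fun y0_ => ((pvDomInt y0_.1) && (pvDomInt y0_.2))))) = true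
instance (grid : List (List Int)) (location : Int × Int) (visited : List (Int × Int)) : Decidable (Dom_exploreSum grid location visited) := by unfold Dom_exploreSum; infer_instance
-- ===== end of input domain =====

-- B replaces A's recursive DFS flood fill by an iterative flood fill with an explicit stack (idiomatic,
-- same cost); both mutate the Python `visited` set identically, and the equivalence proved here is about
-- the return value.

-- helpers shared by the two ports (len(grid), len(grid[0]), grid[r][c]) and the
-- termination measure (number of in-bounds cells not yet visited) with the lemmas
-- the ports' `decreasing_by` cites.

def pvWidth (grid : List (List Int)) : Nat := ((PySem.List.pyGet? grid 0).getD []).length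

def pvGet2 (grid : List (List Int)) (r c : Int) : Int :=
  (PySem.List.pyGet? ((PySem.List.pyGet? grid r).getD []) c).getD 0

def pvCells (grid : List (List Int)) : Finset (Int × Int) :=
  (Finset.range grid.length ×ˢ Finset.range (pvWidth grid)).image (fun p => ((p.1 : Int), (p.2 : Int)))

def pvMeas (grid : List (List Int)) (vis : List (Int × Int)) : Nat :=
  (pvCells grid \ vis.toFinset).card

lemma pvMem_cells {grid : List (List Int)} {loc : Int × Int}
    (h1 : 0 ≤ loc.1) (h2 : loc.1 < (grid.length : Int))
    (h3 : 0 ≤ loc.2) (h4 : loc.2 < (pvWidth grid : Int)) : loc ∈ pvCells grid := by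
  simp only [pvCells, Finset.mem_image, Finset.mem_product, Finset.mem_range, Prod.exists]
  exact ⟨loc.1.toNat, loc.2.toNat, ⟨by omega, by omega⟩, by
    simp only [Prod.ext_iff]; constructor <;> simp <;> omega⟩

lemma pvSubset_add (vis : List (Int × Int)) (loc : Int × Int) :
    ∀ x, x ∈ vis → x ∈ PySem.Set.add vis loc := by
  intro x hx
  simp [PySem.Set.add]
  split <;> simp [hx]

lemma pvMeas_mono {grid : List (List Int)} {v v' : List (Int × Int)}
    (h : ∀ x, x ∈ v → x ∈ v') : pvMeas grid v' ≤ pvMeas grid v := by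
  apply Finset.card_le_card
  intro x hx
  simp only [Finset.mem_sdiff, List.mem_toFinset] at *
  exact ⟨hx.1, fun hv => hx.2 (h x hv)⟩

lemma pvMeas_add_lt {grid : List (List Int)} {vis : List (Int × Int)} {loc : Int × Int}
    (hc : loc ∈ pvCells grid) (hv : loc ∉ vis) :
    pvMeas grid (PySem.Set.add vis loc) < pvMeas grid vis := by
  apply Finset.card_lt_card
  rw [Finset.ssubset_iff_of_subset]
  · exact ⟨loc, by simp [Finset.mem_sdiff, hc, hv], by
      simp [Finset.mem_sdiff, List.mem_toFinset]⟩
  · apply Finset.sdiff_subset_sdiff (Finset.Subset.refl _)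
    intro x hx
    simp only [List.mem_toFinset] at *
    exact pvSubset_add vis loc x hx

-- ===== PORT A =====
-- A's recursive DFS, with the mutated `visited` set threaded through as the second
-- component (the subtype records "visited only grows", which justifies termination:
-- the number of unvisited in-bounds cells strictly drops at every recursive layer).
-- grid[r][c] / grid[0] are read with pyGet?/getD: inputs where Python raises are outside Pre_.
def exploreGo (grid : List (List Int)) (loc : Int × Int) (vis : List (Int × Int)) :
    Int × {v : List (Int × Int) // ∀ x, x ∈ vis → x ∈ v} :=
  if hb : (0 ≤ loc.1 ∧ loc.1 < (grid.length : Int)) ∧ (0 ≤ loc.2 ∧ loc.2 < (pvWidth grid : Int)) then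
    if pvGet2 grid loc.1 loc.2 = 0 then (0, ⟨vis, fun _ h => h⟩)
    else if hv : loc ∈ vis then (0, ⟨vis, fun _ h => h⟩)
    else
      let p1 := exploreGo grid (loc.1 - 1, loc.2) (PySem.Set.add vis loc)
      let p2 := exploreGo grid (loc.1 + 1, loc.2) p1.2.1
      let p3 := exploreGo grid (loc.1, loc.2 - 1) p2.2.1
      let p4 := exploreGo grid (loc.1, loc.2 + 1) p3.2.1
      (1 + p1.1 + p2.1 + p3.1 + p4.1,
        ⟨p4.2.1, fun x hx => p4.2.2 x (p3.2.2 x (p2.2.2 x (p1.2.2 x (pvSubset_add vis loc x hx))))⟩)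
  else (0, ⟨vis, fun _ h => h⟩)
termination_by pvMeas grid vis
decreasing_by
  all_goals
    have hlt := pvMeas_add_lt (pvMem_cells hb.1.1 hb.1.2 hb.2.1 hb.2.2) hv
  · exact hlt
  · exact lt_of_le_of_lt (pvMeas_mono p1.2.2) hlt
  · exact lt_of_le_of_lt (pvMeas_mono fun x hx => p2.2.2 x (p1.2.2 x hx)) hlt
  · exact lt_of_le_of_lt (pvMeas_mono fun x hx => p3.2.2 x (p2.2.2 x (p1.2.2 x hx))) hlt

def exploreSum (grid : List (List Int)) (location : Int × Int) (visited : List (Int × Int)) : Int :=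
  (exploreGo grid location visited).1

-- ===== PORT B =====
-- Source B's while-loop over the explicit stack; the Lean list's head is the Python list's
-- last element (the top of the stack), so `stack.pop()` is the head and `stack.extend([...])`
-- prepends the four neighbours in reverse.
def floodLoop (grid : List (List Int)) (stack : List (Int × Int)) (vis : List (Int × Int)) (ctr : Int) : Int :=
  match stack with
  | [] => ctr
  | loc :: rest =>
    if hb : (0 ≤ loc.1 ∧ loc.1 < (grid.length : Int)) ∧ (0 ≤ loc.2 ∧ loc.2 < (pvWidth grid : Int)) then
      if hz : pvGet2 grid loc.1 loc.2 = 0 ∨ loc ∈ vis then floodLoop grid rest vis ctr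
      else floodLoop grid
        ((loc.1 - 1, loc.2) :: (loc.1 + 1, loc.2) :: (loc.1, loc.2 - 1) :: (loc.1, loc.2 + 1) :: rest)
        (PySem.Set.add vis loc) (ctr + 1)
    else floodLoop grid rest vis ctr
termination_by (pvMeas grid vis, stack.length)
decreasing_by
  · exact Prod.Lex.right _ (by simp)
  · exact Prod.Lex.left _ _ (pvMeas_add_lt (pvMem_cells hb.1.1 hb.1.2 hb.2.1 hb.2.2) (fun hm => hz (Or.inr hm)))
  · exact Prod.Lex.right _ (by simp)

def exploreSum_alt (grid : List (List Int)) (location : Int × Int) (visited : List (Int × Int)) : Int :=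
  floodLoop grid [location] visited 0

-- ===== PRECONDITION & SPEC =====
-- A raises IndexError when grid == [] (len(grid[0]) is evaluated unconditionally); on a ragged grid
-- (some row shorter than row 0) the flood fill may or may not reach an index past a short row, which
-- is not a closed-form condition, so Pre_ conservatively admits ragged grids only when A returns
-- without flood-filling (start out of bounds, start cell 0, or start already visited); it therefore
-- also excludes some ragged inputs on which A does return — see the cites in the claim.
def Pre_exploreSum (grid : List (List Int)) (location : Int × Int) (visited : List (Int × Int)) : Prop :=
  grid ≠ [] ∧
  ((∀ row ∈ grid, pvWidth grid ≤ row.length) ∨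
   ¬((0 ≤ location.1 ∧ location.1 < (grid.length : Int)) ∧
     (0 ≤ location.2 ∧ location.2 < (pvWidth grid : Int))) ∨
   (location.2 < (((PySem.List.pyGet? grid location.1).getD []).length : Int) ∧
     (pvGet2 grid location.1 location.2 = 0 ∨ location ∈ visited)))
instance (grid : List (List Int)) (location : Int × Int) (visited : List (Int × Int)) : Decidable (Pre_exploreSum grid location visited) := by unfold Pre_exploreSum; infer_instance

def pvWitness_exploreSum : List (List Int) × (Int × Int) × (List (Int × Int)) :=
  ([[1, 1], [0, 1]], (0, 0), [])

-- On grid == [] A raises IndexError (it evaluates len(grid[0]) unconditionally), while B's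
-- short-circuit bounds check returns 0.
def Raises_exploreSum (grid : List (List Int)) (location : Int × Int) (visited : List (Int × Int)) : Prop :=
  grid = []
instance (grid : List (List Int)) (location : Int × Int) (visited : List (Int × Int)) : Decidable (Raises_exploreSum grid location visited) := by unfold Raises_exploreSum; infer_instance

def pvRaiseWitness_exploreSum : List (List Int) × (Int × Int) × (List (Int × Int)) :=
  ([], (0, 0), [])

def pvRaiseWitnessOut_exploreSum : Int := 0

def Spec_exploreSum (grid : List (List Int)) (location : Int × Int) (visited : List (Int × Int)) (out : Int) : Prop := out = exploreSum_alt grid location visited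
instance (grid : List (List Int)) (location : Int × Int) (visited : List (Int × Int)) (out : Int) : Decidable (Spec_exploreSum grid location visited out) := by unfold Spec_exploreSum; infer_instance

-- ===== CLAIM (what is proved, stated in full; the proofs are below) =====
def Claim_equal_exploreSum : Prop := ∀ (grid : List (List Int)) (location : Int × Int) (visited : List (Int × Int)), Dom_exploreSum grid location visited → Pre_exploreSum grid location visited → Spec_exploreSum grid location visited (exploreSum grid location visited)

def Claim_raises_exploreSum : Prop := (∀ (grid : List (List Int)) (location : Int × Int) (visited : List (Int × Int)), Dom_exploreSum grid location visited → Raises_exploreSum grid location visited → ¬ Pre_exploreSum grid location visited) ∧ (Dom_exploreSum (pvRaiseWitness_exploreSum.1) (pvRaiseWitness_exploreSum.2.1) (pvRaiseWitness_exploreSum.2.2) ∧ Raises_exploreSum (pvRaiseWitness_exploreSum.1) (pvRaiseWitness_exploreSum.2.1) (pvRaiseWitness_exploreSum.2.2) ∧ exploreSum_alt (pvRaiseWitness_exploreSum.1) (pvRaiseWitness_exploreSum.2.1) (pvRaiseWitness_exploreSum.2.2) = pvRaiseWitnessOut_exploreSum)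

-- ===== LEMMAS AND PROOFS =====

lemma floodLoop_nil (grid : List (List Int)) (vis : List (Int × Int)) (ctr : Int) :
    floodLoop grid [] vis ctr = ctr := by
  rw [floodLoop.eq_def]

-- The heart of the equivalence: popping `loc` off the stack behaves exactly like A's
-- recursive call on `loc` — it adds A's DFS count to the accumulator and leaves A's
-- visited set — because the four neighbours are pushed so that they are popped in
-- A's recursion order.  Proof by functional induction on A's DFS.
lemma floodLoop_exploreGo (grid : List (List Int)) (loc : Int × Int) (vis : List (Int × Int)) :
    ∀ rest ctr, floodLoop grid (loc :: rest) vis ctr =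
      floodLoop grid rest (exploreGo grid loc vis).2.1 (ctr + (exploreGo grid loc vis).1) := by
  fun_induction exploreGo grid loc vis with
  | case1 loc vis hb hz =>
    intro rest ctr
    rw [floodLoop.eq_def]
    simp [hb, hz]
  | case2 loc vis hb h1 h2 =>
    intro rest ctr
    rw [floodLoop.eq_def]
    simp [hb, h1, h2]
  | case3 loc vis hb h1 h2 p1 p2 p3 p4 ih7 ih6 ih5 ih4 ih3 ih2 ih1 =>
    intro rest ctr
    rw [floodLoop.eq_def]
    have hz : ¬(pvGet2 grid loc.1 loc.2 = 0 ∨ loc ∈ vis) := by tauto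
    simp only [hb, hz, dif_pos, and_self]
    rw [ih7, ih5, ih3, ih1]
    rw [dif_neg not_false]
    simp only [p1, p2, p3, p4]
    congr 1
    ring
  | case4 loc vis hb =>
    intro rest ctr
    rw [floodLoop.eq_def]
    simp [hb]

-- ===== VERDICT (by name: the statement is the Claim_ definition above) =====
theorem exploreSum_spec : Claim_equal_exploreSum := by
  intro grid location visited _ _
  unfold Spec_exploreSum exploreSum exploreSum_alt
  rw [floodLoop_exploreGo, floodLoop_nil]
  ring

@[simp] theorem exploreSum_raises : Claim_raises_exploreSum := by
  unfold Claim_raises_exploreSum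
  refine ⟨?_, by decide, by decide, ?_⟩
  · intro grid location visited _ hR hP
    exact hP.1 hR
  · show exploreSum_alt [] (0, 0) [] = 0
    unfold exploreSum_alt
    rw [floodLoop.eq_def]
    norm_num [pvWidth, PySem.List.pyGet?, floodLoop_nil]
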